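-- pv_equiv track=rewrite | github.com/glennyeet/leetcode | 2022. Convert 1D Array Into 2D Array/construct2DArray.py | construct2DArray
-- ===== SOURCE A (Python) =====
-- from typing import List
--
-- def construct2DArray(original: List[int], m: int, n: int) -> List[List[int]]:
--     if len(original) != m * n:
--         return []
--     two_d_array = [[0] * n for _ in range(m)]
--     for i in range(len(original)):
--         m_index = i // n
--         n_index = i % n
--         two_d_array[m_index][n_index] = original[i]
--     return two_d_array
-- ===== SOURCE B (Python) =====
-- def construct2DArray(original, m, n):
--     if len(original) != m * n:
--         return []
--     return [original[i * n:(i + 1) * n] for i in range(m)]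
-- ===== Notes on version B (the rewrite author's own statement) =====
-- stated objective: simpler
-- what changed: Instead of preallocating a zero-filled m-by-n grid and assigning each of the m*n elements via i//n and i%n index arithmetic, B builds each row directly as a contiguous slice original[i*n:(i+1)*n], with no grid mutation and no per-element index math.
import Mathlib
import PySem

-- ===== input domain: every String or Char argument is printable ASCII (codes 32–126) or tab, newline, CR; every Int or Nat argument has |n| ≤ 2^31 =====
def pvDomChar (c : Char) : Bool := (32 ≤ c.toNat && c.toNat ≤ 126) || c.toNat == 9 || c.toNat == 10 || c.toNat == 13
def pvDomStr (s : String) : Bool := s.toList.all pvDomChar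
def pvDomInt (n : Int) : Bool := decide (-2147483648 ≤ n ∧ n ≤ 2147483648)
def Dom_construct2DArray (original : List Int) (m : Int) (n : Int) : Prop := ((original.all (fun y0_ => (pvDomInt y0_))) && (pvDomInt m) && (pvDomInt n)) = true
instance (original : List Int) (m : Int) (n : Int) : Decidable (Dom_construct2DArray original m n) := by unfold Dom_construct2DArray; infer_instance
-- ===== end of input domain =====

-- B replaces A's zero-filled grid and per-element i//n, i%n assignments with direct contiguous row slices (simpler; same cost).

-- ===== PORT A =====
-- literal transliteration of A: guard, zero grid, then the flat element loop with floordiv/mod indexing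
def construct2DArray (original : List Int) (m : Int) (n : Int) : List (List Int) :=
  if (original.length : Int) ≠ m * n then []
  else
    let init := (PySem.List.pyRange 0 m 1).map (fun _ => List.replicate n.toNat (0 : Int))
    (PySem.List.pyRange 0 (original.length : Int) 1).foldl
      (fun g i =>
        let mIdx := PySem.Int.floordiv i n
        let nIdx := PySem.Int.mod i n
        PySem.List.pySetD g mIdx (PySem.List.pySetD (PySem.List.pyGetD g mIdx []) nIdx (PySem.List.pyGetD original i 0)))
      init

-- ===== PORT B =====
-- literal transliteration of B: guard, then one slice per row
def construct2DArray_alt (original : List Int) (m : Int) (n : Int) : List (List Int) :=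
  if (original.length : Int) ≠ m * n then []
  else (PySem.List.pyRange 0 m 1).map (fun i => PySem.List.slice original (some (i * n)) (some ((i + 1) * n)))

-- ===== PRECONDITION & SPEC =====
-- Pre_ excludes exactly the inputs on which A raises IndexError (m < 0 ∧ n < 0 with len(original) = m*n: A's
-- preallocated grid is empty but the loop runs); B returns [] there, since range(m) is empty.
def Pre_construct2DArray (original : List Int) (m : Int) (n : Int) : Prop :=
  ¬ ((original.length : Int) = m * n ∧ m < 0 ∧ n < 0)
instance (original : List Int) (m : Int) (n : Int) : Decidable (Pre_construct2DArray original m n) := by unfold Pre_construct2DArray; infer_instance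

def pvWitness_construct2DArray : List Int × Int × Int := ([1, 2, 3, 4, 5, 6], 2, 3)

def Spec_construct2DArray (original : List Int) (m : Int) (n : Int) (out : List (List Int)) : Prop := out = construct2DArray_alt original m n
instance (original : List Int) (m : Int) (n : Int) (out : List (List Int)) : Decidable (Spec_construct2DArray original m n out) := by unfold Spec_construct2DArray; infer_instance

-- ===== CLAIM (what is proved, stated in full; the proofs are below) =====
def Claim_equal_construct2DArray : Prop := ∀ (original : List Int) (m : Int) (n : Int), Dom_construct2DArray original m n → Pre_construct2DArray original m n → Spec_construct2DArray original m n (construct2DArray original m n)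

-- ===== LEMMAS AND PROOFS =====

-- filling positions js of one fixed row s of the grid equals setting row s to the row-fold
theorem fold_set_row (v : Nat → Int) (s : Nat) :
    ∀ (js : List Nat) (g : List (List Int)), s < g.length →
      js.foldl (fun g j => g.set s ((g.getD s []).set j (v j))) g
        = g.set s (js.foldl (fun r j => r.set j (v j)) (g.getD s [])) := by
  intro js
  induction js with
  | nil =>
    intro g hs
    simp only [List.foldl_nil]
    rw [List.getD_eq_getElem?_getD, List.getElem?_eq_getElem hs]
    exact (List.set_getElem_self hs).symm
  | cons j js ih =>
    intro g hs
    simp only [List.foldl_cons]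
    rw [ih _ (by simpa using hs)]
    have hgd : (g.set s ((g.getD s []).set j (v j))).getD s []
        = (g.getD s []).set j (v j) := by
      rw [List.getD_eq_getElem?_getD, List.getElem?_set_self hs]; rfl
    rw [hgd, List.set_set]

-- filling a row position-by-position over range k yields the map on the prefix
theorem fold_set_range (v : Nat → Int) (N : Nat) :
    ∀ (k : Nat) (r : List Int), r.length = N → k ≤ N →
      (List.range k).foldl (fun r j => r.set j (v j)) r
        = (List.range k).map v ++ r.drop k := by
  intro k
  induction k with
  | zero => intro r _ _; simp
  | succ k ih =>
    intro r hr hk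
    rw [List.range_succ, List.foldl_append, ih r hr (by omega)]
    have hk' : k < r.length := by omega
    simp only [List.foldl_cons, List.foldl_nil]
    rw [List.set_append_right _ _ (by simp)]
    simp only [List.length_map, List.length_range, Nat.sub_self]
    rw [List.drop_eq_getElem_cons hk', List.set_cons_zero]
    simp

-- the slice of row s equals the getD map (when the row is in range)
theorem slice_row (orig : List Int) (N s : Nat) (hlen : (s + 1) * N <= orig.length) :
    (orig.drop (s * N)).take N = (List.range N).map (fun j => orig.getD (s * N + j) 0) := by
  have hsum : s * N + N <= orig.length := by nlinarith
  apply List.ext_getElem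
  · simp; omega
  · intro j h1 h2
    have hj : j < N := by simpa using h2
    have hidx : s * N + j < orig.length := by omega
    simp [List.getD_eq_getElem?_getD, List.getElem?_eq_getElem hidx]

-- main invariant: A's flat loop fills the first M rows of a grid of T zero rows
theorem fill_rows (orig : List Int) (N : Nat) :
    ∀ (M T : Nat), M <= T →
      (List.range (M * N)).foldl
        (fun g i => g.set (i / N) ((g.getD (i / N) []).set (i % N) (orig.getD i 0)))
        (List.replicate T (List.replicate N (0 : Int)))
      = (List.range M).map (fun s => (List.range N).map (fun j => orig.getD (s * N + j) 0))
          ++ List.replicate (T - M) (List.replicate N (0 : Int)) := by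
  intro M
  induction M with
  | zero => intro T _; simp
  | succ M ih =>
    intro T hMT
    have hstep : (M + 1) * N = M * N + N := by ring
    rw [hstep, List.range_add, List.foldl_append, ih T (by omega)]
    set g1 := (List.range M).map (fun s => (List.range N).map (fun j => orig.getD (s * N + j) 0))
          ++ List.replicate (T - M) (List.replicate N (0 : Int)) with hg1
    have hg1len : g1.length = T := by
      rw [hg1]; simp; omega
    have hfold : (List.map (fun j => M * N + j) (List.range N)).foldl
        (fun g i => g.set (i / N) ((g.getD (i / N) []).set (i % N) (orig.getD i 0))) g1
        = (List.range N).foldl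
        (fun g j => g.set M ((g.getD M []).set j (orig.getD (M * N + j) 0))) g1 := by
      rw [List.foldl_map]
      apply PySem.List.foldl_congr_mem
      intro g j hj
      have hjN : j < N := List.mem_range.mp hj
      have hdiv : (M * N + j) / N = M := by
        rw [Nat.mul_comm M N, Nat.mul_add_div (by omega : 0 < N), Nat.div_eq_of_lt hjN]; rfl
      have hmod : (M * N + j) % N = j := by
        rw [Nat.mul_comm M N, Nat.mul_add_mod]; exact Nat.mod_eq_of_lt hjN
      rw [hdiv, hmod]
    rw [hfold, fold_set_row (fun j => orig.getD (M * N + j) 0) M (List.range N) g1 (by omega)]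
    have hgM : g1.getD M [] = List.replicate N (0 : Int) := by
      rw [hg1, List.getD_eq_getElem?_getD, List.getElem?_append_right (by simp),
          List.length_map, List.length_range, Nat.sub_self, List.getElem?_replicate,
          if_pos (show 0 < T - M by omega)]
      rfl
    rw [hgM, fold_set_range _ N N (List.replicate N 0) (by simp) (le_refl N)]
    rw [hg1, List.set_append_right _ _ (by simp)]
    have hTM : T - M = (T - (M + 1)) + 1 := by omega
    simp only [List.length_map, List.length_range, Nat.sub_self, hTM,
      List.replicate_succ, List.set_cons_zero, List.range_succ, List.map_append,
      List.map_cons, List.map_nil, List.drop_replicate]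
    simp [List.append_assoc]

-- the main (nonnegative m, n) case
theorem main_case (orig : List Int) (M N : Nat) (hlen : orig.length = M * N) :
    construct2DArray orig (M : Int) (N : Int) = construct2DArray_alt orig (M : Int) (N : Int) := by
  unfold construct2DArray construct2DArray_alt
  have hguard : ((orig.length : Int) ≠ (M : Int) * (N : Int)) = False := by
    simp; rw [hlen]; push_cast; ring
  simp only [hguard, if_false]
  -- A side: normalise to the Nat fold and apply fill_rows with T = M
  have hinit : (PySem.List.pyRange 0 (M : Int) 1).map
      (fun _ => List.replicate (N : Int).toNat (0 : Int))
      = List.replicate M (List.replicate N (0 : Int)) := by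
    rw [PySem.List.pyRange_zero_natCast]
    simp [Function.comp_def, List.map_const']
  rw [hinit, hlen]
  rw [show ((M * N : Nat) : Int) = (((M * N : Nat) : Nat) : Int) from rfl,
      PySem.List.pyRange_zero_natCast, List.foldl_map]
  have hstep : (fun (g : List (List Int)) (k : Nat) =>
      (fun (g : List (List Int)) (i : Int) =>
        PySem.List.pySetD g (PySem.Int.floordiv i (N : Int))
          (PySem.List.pySetD (PySem.List.pyGetD g (PySem.Int.floordiv i (N : Int)) [])
            (PySem.Int.mod i (N : Int)) (PySem.List.pyGetD orig i 0))) g ((k : Nat) : Int))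
      = (fun (g : List (List Int)) (i : Nat) =>
          g.set (i / N) ((g.getD (i / N) []).set (i % N) (orig.getD i 0))) := by
    funext g i
    simp only [PySem.Int.floordiv_natCast, PySem.Int.mod_natCast,
      PySem.List.pySetD_natCast, PySem.List.pyGetD_natCast, List.getD_eq_getElem?_getD]
  rw [hstep, fill_rows orig N M M (le_refl M)]
  -- B side: slices to getD maps
  rw [PySem.List.pyRange_zero_natCast, List.map_map]
  simp only [Nat.sub_self, List.replicate_zero, List.append_nil]
  apply List.map_congr_left
  intro s hs
  have hsM : s < M := List.mem_range.mp hs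
  have hrange : (s + 1) * N <= orig.length := by
    rw [hlen]; exact Nat.mul_le_mul_right N hsM
  have hcast1 : ((s : Int) * (N : Int)) = (((s * N : Nat) : Nat) : Int) := by push_cast; ring
  have hcast2 : (((s : Int) + 1) * (N : Int)) = (((s * N + N : Nat) : Nat) : Int) := by
    push_cast; ring
  simp only [Function.comp]
  rw [hcast1, hcast2, PySem.List.slice_natCast]
  have hsub : s * N + N - s * N = N := by omega
  rw [hsub, slice_row orig N s hrange]

-- ===== VERDICT (by name: the statement is the Claim_ definition above) =====
theorem construct2DArray_spec : Claim_equal_construct2DArray := by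
  intro o m n hdom hpre
  unfold Spec_construct2DArray
  by_cases hguard : (o.length : Int) = m * n
  · by_cases hm : 0 <= m
    · by_cases hn : 0 <= n
      · -- main case
        obtain ⟨M, rfl⟩ : ∃ M : Nat, m = (M : Int) := ⟨m.toNat, (Int.toNat_of_nonneg hm).symm⟩
        obtain ⟨N, rfl⟩ : ∃ N : Nat, n = (N : Int) := ⟨n.toNat, (Int.toNat_of_nonneg hn).symm⟩
        have hlen : o.length = M * N := by exact_mod_cast hguard
        exact main_case o M N hlen
      · -- 0 <= m, n < 0: forces m = 0 and o = []
        have hmn : m * n <= 0 := by nlinarith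
        have hlen0 : (o.length : Int) = 0 := by
          have : (0 : Int) <= o.length := by positivity
          omega
        have ho : o = [] := by
          have : o.length = 0 := by exact_mod_cast hlen0
          exact List.eq_nil_of_length_eq_zero this
        have hm0 : m = 0 := by
          have : m * n = 0 := by omega
          rcases mul_eq_zero.mp this with h | h
          · exact h
          · omega
        subst ho hm0
        simp [construct2DArray, construct2DArray_alt,
          PySem.List.pyRange_one_eq_nil (le_refl (0 : Int))]
    · -- m < 0: Pre_ forces 0 <= n, so m * n <= 0 and o = []
      have hn : 0 <= n := by
        by_contra hn
        exact hpre ⟨hguard, by omega, by omega⟩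
      have hmn : m * n <= 0 := by nlinarith
      have hlen0 : (o.length : Int) = 0 := by
        have : (0 : Int) <= o.length := by positivity
        omega
      have ho : o = [] := by
        have : o.length = 0 := by exact_mod_cast hlen0
        exact List.eq_nil_of_length_eq_zero this
      subst ho
      simp [construct2DArray, construct2DArray_alt,
        PySem.List.pyRange_one_eq_nil (show m <= (0 : Int) by omega)]
  · simp [construct2DArray, construct2DArray_alt, hguard]
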